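-- pv_equiv track=rewrite | github.com/EBI-Metagenomics/pipeline-v5 | tools/Assembly/KEGG_analysis/make_graphs.py | set_levels
-- ===== SOURCE A (Python) =====
-- def add_to_dict_of_levels(dict_levels, c, cur_level, index):
--     """
--     Function returns the dict of positions according to the level of space or comma
--     Example: {'1_,': [14], '2_,': [9], '0_ ': [3], '1_ ': [12]}
--         comma of level 1: position 14
--         comma of level 2: position 9
--         space of level 0: position 3
--         space of level 1: position 12
--     """
--     symbol = str(cur_level) + '_' + c
--     if symbol not in dict_levels:
--         dict_levels[symbol] = []
--     dict_levels[symbol].append(index)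
--     return dict_levels
--
-- def set_levels(pathway):
--     """
--     Function creates a dictionary of separators in pathway.
--        Keys format: level_separator (ex. '1_,' or '0_ ')
--        Values: list of positions in expression
--     Example:
--         expression: D (A+B) -> levels: 0011111 -> dict_levels: {'0_ ':[1], '1+':[4] }
--
--     :param pathway: string expression
--     :return: dict. of separators with their positions
--     """
--     dict_levels = {}
--     L = len(pathway)
--     cur_level, index = [0 for _ in range(2)]
--
--     while index < L:
--         c = pathway[index]
--         if c == ' ' or c == ',' or c == '-' or c == '+':
--             dict_levels = add_to_dict_of_levels(dict_levels, c, cur_level, index)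
--         elif c == '(':
--             cur_level += 1
--         elif c == ')':
--             cur_level -= 1
--         else:
--             index += 1
--             if index < L:
--                 while pathway[index] not in [' ', ',', '(', ')', '-', '+']:
--                     index += 1
--                     if index >= L: break
--                 index -= 1
--         index += 1
--
--     return dict_levels
-- ===== SOURCE B (Python) =====
-- def set_levels(pathway):
--     # pass 1: nesting level in effect at each position
--     level = 0
--     levels = []
--     for c in pathway:
--         levels.append(level)
--         if c == '(':
--             level += 1
--         elif c == ')':
--             level -= 1
--     # pass 2: collect separator positions keyed by level_separator
--     dict_levels = {}
--     for i, c in enumerate(pathway):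
--         if c in ' ,-+':
--             dict_levels.setdefault(str(levels[i]) + '_' + c, []).append(i)
--     return dict_levels
-- ===== Notes on version B (the rewrite author's own statement) =====
-- stated objective: simpler
-- what changed: Replaces A's single manual-index while-loop state machine (with its redundant word-skipping inner loop) by two plain passes: first build an array of the nesting level at each position, then collect separator positions from enumerate into the dict.
import Mathlib
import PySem

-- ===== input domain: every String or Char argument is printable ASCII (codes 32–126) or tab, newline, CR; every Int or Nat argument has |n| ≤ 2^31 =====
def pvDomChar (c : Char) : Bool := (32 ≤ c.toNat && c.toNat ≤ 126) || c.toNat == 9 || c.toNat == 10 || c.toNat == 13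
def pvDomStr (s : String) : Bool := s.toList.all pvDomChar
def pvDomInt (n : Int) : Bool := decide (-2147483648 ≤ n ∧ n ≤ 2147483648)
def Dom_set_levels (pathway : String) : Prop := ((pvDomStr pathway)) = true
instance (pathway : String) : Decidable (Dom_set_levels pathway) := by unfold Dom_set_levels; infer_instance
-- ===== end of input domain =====

-- B replaces A's single manual-index state machine (with its word-skipping inner loop) by two
-- plain passes — a level array, then a collection pass — same results, objective: simpler.

-- ===== PORT A =====
-- add_to_dict_of_levels: symbol = str(cur_level)+'_'+c; create list on first use; append index
def pvAddA (d : PySem.Dict String (List Int)) (c : Char) (cur : Int) (i : Nat) :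
    PySem.Dict String (List Int) :=
  let symbol := PySem.Int.toStr cur ++ "_" ++ String.singleton c
  let d := if d.contains symbol then d else d.insert symbol ([] : List Int)
  d.modify symbol [] (· ++ [(i : Int)])

-- the inner word-skipping while loop: advance until pathway[index] is a separator or index = L
def pvSkipA (p : List Char) (L i : Nat) : Nat :=
  if i < L then
    if (p.getD i ' ') ∈ ([' ', ',', '(', ')', '-', '+'] : List Char) then i
    else pvSkipA p L (i + 1)
  else i
termination_by L - i

-- needed by pvLoopA's termination proof (cited in decreasing_by)
theorem pvSkipA_ge (p : List Char) (L i : Nat) : i ≤ pvSkipA p L i := by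
  unfold pvSkipA
  split
  · split
    · exact le_refl i
    · exact le_trans (Nat.le_succ i) (pvSkipA_ge p L (i + 1))
  · exact le_refl i
termination_by L - i

-- the outer while loop of A
def pvLoopA (p : List Char) (L : Nat) (d : PySem.Dict String (List Int)) (cur : Int) (i : Nat) :
    PySem.Dict String (List Int) :=
  if h : i < L then
    let c := p.getD i ' '
    if c = ' ' ∨ c = ',' ∨ c = '-' ∨ c = '+' then
      pvLoopA p L (pvAddA d c cur i) cur (i + 1)
    else if c = '(' then pvLoopA p L d (cur + 1) (i + 1)
    else if c = ')' then pvLoopA p L d (cur - 1) (i + 1)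
    else if h2 : i + 1 < L then
      -- index += 1; inner while; index -= 1; index += 1
      pvLoopA p L d cur (pvSkipA p L (i + 1) - 1 + 1)
    else
      pvLoopA p L d cur (i + 1 + 1)
  else d
termination_by L - i
decreasing_by
  · omega
  · omega
  · omega
  · have := pvSkipA_ge p L (i + 1); omega
  · omega

def set_levels (pathway : String) : List (String × List Int) :=
  let p := pathway.toList
  (pvLoopA p p.length PySem.Dict.empty 0 0).items

-- ===== PORT B =====
-- pass 1 state step: append current level, then bump it on parentheses
def pvLevelStep (st : List Int × Int) (c : Char) : List Int × Int :=
  (st.1 ++ [st.2], if c = '(' then st.2 + 1 else if c = ')' then st.2 - 1 else st.2)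

def set_levels_alt (pathway : String) : List (String × List Int) :=
  let p := pathway.toList
  let levels := (p.foldl pvLevelStep ([], 0)).1
  -- pass 2: levels[i] is in range for every enumerated i, so pyGetD is exact here
  let d := (PySem.List.enumerate p).foldl (fun d ic =>
      if ic.2 ∈ ([' ', ',', '-', '+'] : List Char) then
        let key := PySem.Int.toStr (PySem.List.pyGetD levels ic.1 0) ++ "_" ++ String.singleton ic.2
        (d.setdefault key []).modify key [] (· ++ [ic.1])
      else d) PySem.Dict.empty
  d.items

-- ===== PRECONDITION & SPEC =====
def Spec_set_levels (pathway : String) (out : List (String × List Int)) : Prop := out = set_levels_alt pathway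
instance (pathway : String) (out : List (String × List Int)) : Decidable (Spec_set_levels pathway out) := by unfold Spec_set_levels; infer_instance

-- ===== CLAIM (what is proved, stated in full; the proofs are below) =====
def Claim_equal_set_levels : Prop := ∀ (pathway : String), Dom_set_levels pathway → Spec_set_levels pathway (set_levels pathway)

-- ===== LEMMAS AND PROOFS =====

-- canonical per-separator dict update (both ports' updates reduce to it)
def pvAdd (d : PySem.Dict String (List Int)) (c : Char) (cur : Int) (i : Int) :
    PySem.Dict String (List Int) :=
  let key := PySem.Int.toStr cur ++ "_" ++ String.singleton c
  (d.setdefault key []).modify key [] (· ++ [i])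

def pvUpd (c : Char) (cur : Int) : Int :=
  if c = '(' then cur + 1 else if c = ')' then cur - 1 else cur

-- reference one-char-at-a-time loop both ports are reduced to
def pvLoopS (d : PySem.Dict String (List Int)) (cur : Int) (i : Nat) :
    List Char → PySem.Dict String (List Int)
  | [] => d
  | c :: cs =>
    if c = ' ' ∨ c = ',' ∨ c = '-' ∨ c = '+' then pvLoopS (pvAdd d c cur (i : Int)) cur (i + 1) cs
    else pvLoopS d (pvUpd c cur) (i + 1) cs

-- level in effect at each position, as a scan
def pvScan (cur : Int) : List Char → List Int
  | [] => []
  | c :: cs => cur :: pvScan (pvUpd c cur) cs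

theorem pvAddA_eq (d : PySem.Dict String (List Int)) (c : Char) (cur : Int) (i : Nat) :
    pvAddA d c cur i = pvAdd d c cur (i : Int) := by
  unfold pvAddA pvAdd
  dsimp only
  cases h : d.contains (PySem.Int.toStr cur ++ "_" ++ String.singleton c) with
  | true => rw [PySem.Dict.setdefault_of_contains d _ h]; simp
  | false => rw [PySem.Dict.setdefault_of_not_contains d _ h]; simp

theorem pvDrop_cons (p : List Char) (i : Nat) (h : i < p.length) :
    p.drop i = p.getD i ' ' :: p.drop (i + 1) := by
  rw [List.getD_eq_getElem p ' ' h]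
  exact List.drop_eq_getElem_cons h

theorem pvSkipA_loopS (p : List Char) (d : PySem.Dict String (List Int)) (cur : Int) (i : Nat) :
    pvLoopS d cur i (p.drop i)
      = pvLoopS d cur (pvSkipA p p.length i) (p.drop (pvSkipA p p.length i)) := by
  unfold pvSkipA
  split
  · rename_i h
    split
    · rfl
    · rename_i hns
      rw [pvDrop_cons p i h]
      have hc : ¬ (p.getD i ' ' = ' ' ∨ p.getD i ' ' = ',' ∨ p.getD i ' ' = '-' ∨ p.getD i ' ' = '+') := by
        simp only [List.mem_cons] at hns; tauto
      have hupd : pvUpd (p.getD i ' ') cur = cur := by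
        unfold pvUpd
        simp only [List.mem_cons] at hns
        rw [if_neg (by tauto), if_neg (by tauto)]
      rw [pvLoopS, if_neg hc, hupd]
      exact pvSkipA_loopS p d cur (i + 1)
  · rfl
termination_by p.length - i

theorem pvLoopA_eq (p : List Char) (d : PySem.Dict String (List Int)) (cur : Int) (i : Nat) :
    pvLoopA p p.length d cur i = pvLoopS d cur i (p.drop i) := by
  unfold pvLoopA
  by_cases h : i < p.length
  · rw [dif_pos h]
    dsimp only
    rw [pvDrop_cons p i h, pvLoopS]
    by_cases hsep : p.getD i ' ' = ' ' ∨ p.getD i ' ' = ',' ∨ p.getD i ' ' = '-' ∨ p.getD i ' ' = '+'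
    · rw [if_pos hsep, if_pos hsep, pvAddA_eq]
      exact pvLoopA_eq p _ cur (i + 1)
    · rw [if_neg hsep, if_neg hsep]
      by_cases hl : p.getD i ' ' = '('
      · rw [if_pos hl]
        have : pvUpd (p.getD i ' ') cur = cur + 1 := by unfold pvUpd; rw [if_pos hl]
        rw [this]; exact pvLoopA_eq p d (cur + 1) (i + 1)
      · rw [if_neg hl]
        by_cases hr : p.getD i ' ' = ')'
        · rw [if_pos hr]
          have : pvUpd (p.getD i ' ') cur = cur - 1 := by unfold pvUpd; rw [if_neg hl, if_pos hr]
          rw [this]; exact pvLoopA_eq p d (cur - 1) (i + 1)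
        · rw [if_neg hr]
          have hupd : pvUpd (p.getD i ' ') cur = cur := by unfold pvUpd; rw [if_neg hl, if_neg hr]
          rw [hupd]
          by_cases h2 : i + 1 < p.length
          · rw [dif_pos h2]
            have hge := pvSkipA_ge p p.length (i + 1)
            have hstep : pvSkipA p p.length (i + 1) - 1 + 1 = pvSkipA p p.length (i + 1) := by omega
            rw [hstep, pvLoopA_eq p d cur (pvSkipA p p.length (i + 1))]
            exact (pvSkipA_loopS p d cur (i + 1)).symm
          · rw [dif_neg h2]
            rw [pvLoopA_eq p d cur (i + 1 + 1)]
            have e1 : p.drop (i + 1) = [] := List.drop_eq_nil_of_le (by omega)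
            have e2 : p.drop (i + 1 + 1) = [] := List.drop_eq_nil_of_le (by omega)
            rw [e1, e2]; rfl
  · rw [dif_neg h, List.drop_eq_nil_of_le (by omega)]
    rfl
termination_by p.length - i
decreasing_by
  all_goals first
  | omega
  | (have := pvSkipA_ge p (p.length) (i + 1); omega)

theorem pvFoldLevels (cs : List Char) (acc : List Int) (cur : Int) :
    (cs.foldl pvLevelStep (acc, cur)).1 = acc ++ pvScan cur cs := by
  induction cs generalizing acc cur with
  | nil => simp [pvScan]
  | cons c cs ih =>
    rw [List.foldl_cons]
    have hstep : pvLevelStep (acc, cur) c = (acc ++ [cur], pvUpd c cur) := rfl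
    rw [hstep, ih, pvScan]
    simp

theorem pvGetD_drop (l : List Int) (i : Nat) (d : Int) :
    l.getD i d = (l.drop i).headD d := by
  induction l generalizing i with
  | nil => simp
  | cons x xs ih =>
    cases i with
    | zero => simp
    | succ n => simpa using ih n

theorem pvFoldB (levels : List Int) (cs : List Char) (i : Nat) (cur : Int)
    (d : PySem.Dict String (List Int)) (hlev : levels.drop i = pvScan cur cs) :
    (PySem.List.enumerate cs (i : Int)).foldl (fun d ic =>
      if ic.2 ∈ ([' ', ',', '-', '+'] : List Char) then
        let key := PySem.Int.toStr (PySem.List.pyGetD levels ic.1 0) ++ "_" ++ String.singleton ic.2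
        (d.setdefault key []).modify key [] (· ++ [ic.1])
      else d) d = pvLoopS d cur i cs := by
  induction cs generalizing i cur d with
  | nil => simp [PySem.List.enumerate_nil, pvLoopS]
  | cons c cs ih =>
    rw [PySem.List.enumerate_cons, List.foldl_cons, pvLoopS]
    have hget : PySem.List.pyGetD levels (i : Int) 0 = cur := by
      rw [PySem.List.pyGetD_natCast, pvGetD_drop, hlev]
      rfl
    have htail : levels.drop (i + 1) = pvScan (pvUpd c cur) cs := by
      have : levels.drop (i + 1) = (levels.drop i).drop 1 := by
        rw [List.drop_drop]
      rw [this, hlev]; rfl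
    have hcast : (i : Int) + 1 = ((i + 1 : Nat) : Int) := by push_cast; ring
    by_cases hsep : c = ' ' ∨ c = ',' ∨ c = '-' ∨ c = '+'
    · rw [if_pos hsep]
      have hmem : c ∈ ([' ', ',', '-', '+'] : List Char) := by
        simp only [List.mem_cons]; tauto
      simp only [hmem, if_pos, hget]
      have hcur : pvUpd c cur = cur := by
        unfold pvUpd
        rcases hsep with h | h | h | h <;> subst h <;> rfl
      rw [hcast, ih (i + 1) (pvUpd c cur) _ htail, hcur]
      rfl
    · rw [if_neg hsep]
      have hmem : c ∉ ([' ', ',', '-', '+'] : List Char) := by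
        simp only [List.mem_cons]; tauto
      simp only [hmem, if_neg, if_false]
      rw [hcast, ih (i + 1) (pvUpd c cur) d htail]

-- ===== VERDICT (by name: the statement is the Claim_ definition above) =====
theorem set_levels_spec : Claim_equal_set_levels := by
  intro pathway _
  unfold Spec_set_levels set_levels set_levels_alt
  have hA := pvLoopA_eq pathway.toList PySem.Dict.empty 0 0
  rw [List.drop_zero] at hA
  have hlev : ((pathway.toList.foldl pvLevelStep ([], 0)).1).drop 0 = pvScan 0 pathway.toList := by
    rw [List.drop_zero, pvFoldLevels]; simp
  have hB := pvFoldB ((pathway.toList.foldl pvLevelStep ([], 0)).1) pathway.toList 0 0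
      PySem.Dict.empty hlev
  simp only [PySem.List.enumerate] at hB ⊢
  rw [hA]
  rw [show ((0 : Nat) : Int) = (0 : Int) from rfl] at hB
  rw [← hB]
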